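-- pv_equiv track=rewrite | github.com/endreymarcell/hog | src/utils.py | get_word_list_without_matching_word
-- ===== SOURCE A (Python) =====
-- from typing import List, Iterator
--
-- def get_word_list_without_matching_word(
--     word_list: List[str], word_prefix: str
-- ) -> List[str]:
--     for i, word in enumerate(word_list):
--         if word.startswith(word_prefix):
--             word_list_without_matching_word = word_list[:i] + word_list[i + 1 :]
--             return word_list_without_matching_word
--     raise Exception("word prefix not found in word list")
-- ===== SOURCE B (Python) =====
-- def get_word_list_without_matching_word(word_list, word_prefix):
--     result = []
--     removed = False
--     for word in word_list:
--         if not removed and word.startswith(word_prefix):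
--             removed = True
--         else:
--             result.append(word)
--     if not removed:
--         raise Exception("word prefix not found in word list")
--     return result
-- ===== Notes on version B (the rewrite author's own statement) =====
-- stated objective: alternative
-- what changed: Replaced A's find-index-then-concatenate-two-slices with a single conditional-copy pass carrying a 'removed' flag.
import Mathlib
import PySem

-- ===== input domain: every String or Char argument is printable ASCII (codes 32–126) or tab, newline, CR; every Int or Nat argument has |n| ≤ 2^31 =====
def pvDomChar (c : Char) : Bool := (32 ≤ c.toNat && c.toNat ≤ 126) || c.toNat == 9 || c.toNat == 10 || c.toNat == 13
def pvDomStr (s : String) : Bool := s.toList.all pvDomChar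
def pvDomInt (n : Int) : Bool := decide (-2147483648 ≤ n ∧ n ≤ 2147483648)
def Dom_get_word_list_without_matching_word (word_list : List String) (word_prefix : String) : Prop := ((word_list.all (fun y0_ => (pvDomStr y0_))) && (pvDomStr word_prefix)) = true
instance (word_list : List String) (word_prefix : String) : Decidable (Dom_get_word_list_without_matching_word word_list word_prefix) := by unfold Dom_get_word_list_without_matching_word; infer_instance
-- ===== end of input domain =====

-- B replaces A's find-index-then-concatenate-two-slices with one conditional-copy pass
-- carrying a 'removed' flag (objective: alternative, same cost). Both raise when no word
-- matches, so Pre_ excludes exactly those inputs.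

-- ===== PORT A =====
-- the 'for i, word in enumerate(word_list)' loop; on the first match return
-- word_list[:i] + word_list[i+1:]; falling off the loop is the raise (Pre_ excludes it).
def pvAGo (orig : List String) (word_prefix : String) : List (Int × String) → List String
  | [] => []  -- raise Exception("word prefix not found in word list"); excluded by Pre_
  | (i, word) :: rest =>
    if PySem.Str.startswith word word_prefix then
      PySem.List.slice orig none (some i) ++ PySem.List.slice orig (some (i + 1)) none
    else pvAGo orig word_prefix rest

def get_word_list_without_matching_word (word_list : List String) (word_prefix : String) : List String :=
  pvAGo word_list word_prefix (PySem.List.enumerate word_list 0)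

-- ===== PORT B =====
-- single pass: skip the first matching word (flag 'removed'), keep everything else.
def pvBGo (word_prefix : String) : List String → Bool → List String
  | [], _ => []  -- if not removed, Python B raises here; excluded by Pre_
  | word :: rest, removed =>
    if !removed && PySem.Str.startswith word word_prefix then
      pvBGo word_prefix rest true
    else
      word :: pvBGo word_prefix rest removed

def get_word_list_without_matching_word_alt (word_list : List String) (word_prefix : String) : List String :=
  pvBGo word_prefix word_list false

-- ===== PRECONDITION & SPEC =====
-- Pre_ excludes exactly the inputs where A (and B) raise: no word starts with the prefix.
def Pre_get_word_list_without_matching_word (word_list : List String) (word_prefix : String) : Prop :=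
  ∃ w ∈ word_list, PySem.Str.startswith w word_prefix = true
instance (word_list : List String) (word_prefix : String) : Decidable (Pre_get_word_list_without_matching_word word_list word_prefix) := by unfold Pre_get_word_list_without_matching_word; infer_instance

def pvWitness_get_word_list_without_matching_word : List String × String := (["apple", "banana"], "ban")

def Spec_get_word_list_without_matching_word (word_list : List String) (word_prefix : String) (out : List String) : Prop := out = get_word_list_without_matching_word_alt word_list word_prefix
instance (word_list : List String) (word_prefix : String) (out : List String) : Decidable (Spec_get_word_list_without_matching_word word_list word_prefix out) := by unfold Spec_get_word_list_without_matching_word; infer_instance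

-- ===== CLAIM (what is proved, stated in full; the proofs are below) =====
def Claim_equal_get_word_list_without_matching_word : Prop := ∀ (word_list : List String) (word_prefix : String), Dom_get_word_list_without_matching_word word_list word_prefix → Pre_get_word_list_without_matching_word word_list word_prefix → Spec_get_word_list_without_matching_word word_list word_prefix (get_word_list_without_matching_word word_list word_prefix)

-- ===== LEMMAS AND PROOFS =====

-- once the flag is set, B copies the rest unchanged
theorem pvBGo_true (p : String) (xs : List String) : pvBGo p xs true = xs := by
  induction xs with
  | nil => rfl
  | cons x xs ih => simp [pvBGo, ih]

-- shifting the enumeration start by one while consing x onto the sliced list keeps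
-- A's loop result one cons ahead, as long as a match exists in the remaining pairs
theorem pvAGo_shift (p : String) (rest : List String) :
    ∀ (s : Nat) (x : String) (orig : List String),
      (∃ w ∈ rest, PySem.Str.startswith w p = true) →
      pvAGo (x :: orig) p (PySem.List.enumerate rest ((s : Int) + 1)) =
        x :: pvAGo orig p (PySem.List.enumerate rest (s : Int)) := by
  induction rest with
  | nil => intro _ _ _ h; simp at h
  | cons w rs ih =>
    intro s x orig h
    rw [PySem.List.enumerate_cons, PySem.List.enumerate_cons]
    by_cases hw : PySem.Str.startswith w p = true
    · have h1 : ((s : Int) + 1) = ((s + 1 : Nat) : Int) := by push_cast; ring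
      simp only [pvAGo, hw, if_pos]
      rw [h1, show (((s + 1 : Nat) : Int) + 1) = ((s + 2 : Nat) : Int) from by push_cast; ring,
          PySem.List.slice_to_natCast, PySem.List.slice_from_natCast,
          PySem.List.slice_to_natCast, PySem.List.slice_from_natCast]
      simp [List.take_succ_cons, List.drop_succ_cons]
    · have h' : ∃ v ∈ rs, PySem.Str.startswith v p = true := by
        rcases h with ⟨v, hv, hvp⟩
        rcases List.mem_cons.mp hv with rfl | hv'
        · exact absurd hvp hw
        · exact ⟨v, hv', hvp⟩
      simp only [pvAGo, hw, if_neg, Bool.false_eq_true, not_false_iff]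
      have := ih (s + 1) x orig h'
      have hc : ((s : Int) + 1 + 1) = (((s + 1 : Nat) : Int) + 1) := by push_cast; ring
      have hc2 : ((s : Int) + 1) = (((s + 1 : Nat) : Int)) := by push_cast; ring
      rw [hc, this, ← hc2]

theorem pv_main (p : String) (xs : List String) :
    (∃ w ∈ xs, PySem.Str.startswith w p = true) →
    pvAGo xs p (PySem.List.enumerate xs 0) = pvBGo p xs false := by
  induction xs with
  | nil => intro h; simp at h
  | cons x rs ih =>
    intro h
    rw [PySem.List.enumerate_cons]
    by_cases hx : PySem.Str.startswith x p = true
    · simp only [pvAGo, pvBGo, hx, if_pos]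
      rw [pvBGo_true]
      simp [PySem.List.slice]
    · have h' : ∃ v ∈ rs, PySem.Str.startswith v p = true := by
        rcases h with ⟨v, hv, hvp⟩
        rcases List.mem_cons.mp hv with rfl | hv'
        · exact absurd hvp hx
        · exact ⟨v, hv', hvp⟩
      simp only [pvAGo, pvBGo, hx, if_neg, Bool.false_eq_true, not_false_iff]
      have hs : ((0 : Int) + 1) = (((0 : Nat) : Int) + 1) := by norm_num
      rw [hs, pvAGo_shift p rs 0 x rs h']
      simp only [Nat.cast_zero]
      rw [ih h']
      simp

-- ===== VERDICT (by name: the statement is the Claim_ definition above) =====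
theorem get_word_list_without_matching_word_spec : Claim_equal_get_word_list_without_matching_word := by
  intro wl p _ hpre
  unfold Spec_get_word_list_without_matching_word get_word_list_without_matching_word get_word_list_without_matching_word_alt
  exact pv_main p wl hpre
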